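-- pv_equiv track=rewrite | github.com/FranciscoMoretti/coding-challenges | project_euler_100/006-sum_square_difference.py | primePowersCloserTo
-- ===== SOURCE A (Python) =====
-- def isPrime(num):
--     # If given number is greater than 1
--     if num > 1 and num != 4:
--         # Iterate from 2 to n / 2
--         for i in range(2, num//2):
--             # If num is divisible by any number between
--             # 2 and n / 2, it is not prime
--             if (num % i) == 0:
--                 return False
--                 break
--         else:
--             return True
--     else:
--         return False
--
-- def primesUpTo(num):
--     primes = []
--     for i in range(num+1):
--         if isPrime(i):
--             primes.append(i)
--     return primes
--
-- def primePowersCloserTo(num):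
--     primes = primesUpTo(num)
--     primePowers = []
--     for prime in primes:
--         power = 1
--         while(pow(prime,power+1) <= num):
--             power += 1
--         primePowers.append(pow(prime,power))
--     return primePowers
-- ===== SOURCE B (Python) =====
-- def primePowersCloserTo(num):
--     # One fused pass: trial-divide each n only by already-found primes p with p*p <= n,
--     # and compute the largest power by repeated multiplication.
--     primes = []
--     primePowers = []
--     for n in range(2, num + 1):
--         if all(n % p for p in primes if p * p <= n):
--             primes.append(n)
--             pp = n
--             while pp * n <= num:
--                 pp *= n
--             primePowers.append(pp)
--     return primePowers
-- ===== Notes on version B (the rewrite author's own statement) =====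
-- stated objective: faster
-- what changed: Single fused pass: each candidate n is trial-divided only by the primes already found with p*p <= n (instead of by every integer in 2..n//2 as in A's isPrime), and the largest power <= num is computed by repeated multiplication in the same pass instead of a separate exponentiation loop.
import Mathlib
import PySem

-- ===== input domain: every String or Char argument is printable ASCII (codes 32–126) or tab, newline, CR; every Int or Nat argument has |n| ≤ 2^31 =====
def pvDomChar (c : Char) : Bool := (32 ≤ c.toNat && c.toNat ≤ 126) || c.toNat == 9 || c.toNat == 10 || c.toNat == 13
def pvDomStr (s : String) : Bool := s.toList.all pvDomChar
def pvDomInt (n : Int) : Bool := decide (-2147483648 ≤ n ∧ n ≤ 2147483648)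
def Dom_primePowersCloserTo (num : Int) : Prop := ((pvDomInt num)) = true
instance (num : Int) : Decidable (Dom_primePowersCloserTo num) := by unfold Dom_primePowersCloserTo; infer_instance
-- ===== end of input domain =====

-- B fuses prime generation (trial division only by already-found primes p with p*p ≤ n)
-- and the largest-power computation (repeated multiplication) into one pass; measured faster than A.


-- ===== PORT A =====
def isPrime (num : Int) : Bool :=
  if num > 1 ∧ num ≠ 4 then
    -- for i in range(2, num//2): if num % i == 0: return False / for-else: return True
    !((PySem.List.pyRange 2 (PySem.Int.floordiv num 2) 1).any (fun i => PySem.Int.mod num i == 0))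
  else
    false

def primesUpTo (num : Int) : List Int :=
  (PySem.List.pyRange 0 (num + 1) 1).foldl
    (fun primes i => if isPrime i then primes ++ [i] else primes) []

-- A's while loop: power += 1 while prime ** (power + 1) <= num.  The Nat fuel is a totality
-- guard only: at every call site prime ≥ 2, so the loop runs at most log2 num < (num+1).toNat steps.
def powLoopA (prime num : Int) : Nat → Nat → Nat
  | 0, power => power
  | fuel + 1, power =>
    if prime ^ (power + 1) ≤ num then powLoopA prime num fuel (power + 1) else power

def primePowersCloserTo (num : Int) : List Int :=
  (primesUpTo num).foldl
    (fun primePowers prime => primePowers ++ [prime ^ (powLoopA prime num (num + 1).toNat 1)]) []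

-- ===== PORT B =====
-- B's while loop: pp *= n while pp * n <= num.  The Nat fuel is a totality guard only:
-- at every call site n ≥ 2 and pp ≥ 1, so the loop runs at most log2 num < (num+1).toNat steps.
def ppLoopB (n num : Int) : Nat → Int → Int
  | 0, pp => pp
  | fuel + 1, pp =>
    if pp * n ≤ num then ppLoopB n num fuel (pp * n) else pp

def primePowersCloserTo_alt (num : Int) : List Int :=
  ((PySem.List.pyRange 2 (num + 1) 1).foldl
    (fun st n =>
      if (st.1.filter (fun p => decide (p * p ≤ n))).all (fun p => PySem.Int.mod n p != 0) then
        (st.1 ++ [n], st.2 ++ [ppLoopB n num (num + 1).toNat n])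
      else st)
    ([], [])).2

-- ===== PRECONDITION & SPEC =====
def Spec_primePowersCloserTo (num : Int) (out : List Int) : Prop := out = primePowersCloserTo_alt num
instance (num : Int) (out : List Int) : Decidable (Spec_primePowersCloserTo num out) := by unfold Spec_primePowersCloserTo; infer_instance

-- ===== CLAIM (what is proved, stated in full; the proofs are below) =====
def Claim_equal_primePowersCloserTo : Prop := ∀ (num : Int), Dom_primePowersCloserTo num → Spec_primePowersCloserTo num (primePowersCloserTo num)

-- ===== LEMMAS AND PROOFS =====

-- the mathematical prime test both programs implement
def primeT (n : Int) : Bool := decide (2 ≤ n) && decide (Nat.Prime n.toNat)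

-- A's divisor scan over 2..num//2 finds a divisor exactly on the non-primes (given n ≥ 2, n ≠ 4)
theorem exists_div_iff (n : Int) (h2 : 2 ≤ n) (h4 : n ≠ 4) :
    (∃ i : Int, (2 ≤ i ∧ i < PySem.Int.floordiv n 2) ∧ i ∣ n) ↔ ¬ Nat.Prime n.toNat := by
  rw [PySem.Int.floordiv_eq_ediv_of_pos (by norm_num)]
  constructor
  · rintro ⟨i, ⟨hi2, hilt⟩, hdvd⟩ hp
    have hdn : i.toNat ∣ n.toNat := by
      apply Int.natCast_dvd_natCast.mp
      rw [Int.toNat_of_nonneg (by omega : (0:Int) ≤ i), Int.toNat_of_nonneg (by omega : (0:Int) ≤ n)]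
      exact hdvd
    rcases hp.eq_one_or_self_of_dvd _ hdn with h1 | h1 <;> omega
  · intro hnp
    have hm2 : 2 ≤ n.toNat := by omega
    have hk := Nat.minFac_prime (by omega : n.toNat ≠ 1)
    have hkd := Nat.minFac_dvd n.toNat
    have hsq : n.toNat.minFac * n.toNat.minFac ≤ n.toNat := by
      have := Nat.minFac_sq_le_self (by omega) hnp
      nlinarith
    have hlb : 2 * n.toNat.minFac + 2 ≤ n.toNat := by
      rcases Nat.lt_or_ge n.toNat.minFac 3 with h3 | h3
      · have he : n.toNat.minFac = 2 := by have := hk.two_le; omega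
        rw [he] at hkd
        have hne : n.toNat ≠ 2 := fun hh => hnp (hh ▸ Nat.prime_two)
        omega
      · nlinarith
    have hcd : ((n.toNat.minFac : Int)) ∣ n := by
      have : ((n.toNat.minFac : Int)) ∣ ((n.toNat : Int)) := Int.natCast_dvd_natCast.mpr hkd
      simpa [Int.toNat_of_nonneg (by omega : (0:Int) ≤ n)] using this
    exact ⟨(n.toNat.minFac : Int), ⟨by exact_mod_cast hk.two_le, by omega⟩, hcd⟩

theorem isPrime_eq_primeT (n : Int) : isPrime n = primeT n := by
  unfold isPrime primeT
  split
  · rename_i h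
    have hany : ((PySem.List.pyRange 2 (PySem.Int.floordiv n 2) 1).any
        (fun i => PySem.Int.mod n i == 0) = true) ↔ ¬ Nat.Prime n.toNat := by
      rw [List.any_eq_true]
      simp only [PySem.List.mem_pyRange_one, beq_iff_eq, PySem.Int.mod_eq_zero_iff_dvd]
      exact exists_div_iff n (by omega) h.2
    have hd2 : decide (2 ≤ n) = true := by simp; omega
    rw [hd2, Bool.true_and]
    cases hb : ((PySem.List.pyRange 2 (PySem.Int.floordiv n 2) 1).any
        (fun i => PySem.Int.mod n i == 0)) with
    | true => simp [hany.mp hb]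
    | false =>
      have hpr : Nat.Prime n.toNat := by
        by_contra hc
        have := hany.mpr hc
        rw [hb] at this
        exact Bool.false_ne_true this
      simp [hpr]
  · rename_i h
    by_cases h1 : 2 ≤ n
    · have h4 : n = 4 := by omega
      subst h4; decide
    · simp [h1]

-- B's test (divide only by the primes below a that satisfy p*p ≤ a) is the same prime test
theorem testB_eq_primeT (a : Int) (h2 : 2 ≤ a) (primes : List Int)
    (hmem : ∀ p : Int, p ∈ primes ↔ (2 ≤ p ∧ p < a) ∧ primeT p = true) :
    ((primes.filter (fun p => decide (p * p ≤ a))).all (fun p => PySem.Int.mod a p != 0)) = primeT a := by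
  unfold primeT
  by_cases hp : Nat.Prime a.toNat
  · simp only [hp, decide_true, (by simp; omega : decide (2 ≤ a) = true), Bool.and_self]
    rw [List.all_eq_true]
    intro p hpin
    rw [List.mem_filter] at hpin
    obtain ⟨hpin, hple⟩ := hpin
    rw [hmem] at hpin
    obtain ⟨⟨hp2, hpa⟩, _⟩ := hpin
    simp only [bne_iff_ne, ne_eq, PySem.Int.mod_eq_zero_iff_dvd]
    intro hdvd
    have hdn : p.toNat ∣ a.toNat := by
      apply Int.natCast_dvd_natCast.mp
      rw [Int.toNat_of_nonneg (by omega : (0:Int) ≤ p), Int.toNat_of_nonneg (by omega : (0:Int) ≤ a)]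
      exact hdvd
    rcases hp.eq_one_or_self_of_dvd _ hdn with h1 | h1 <;> omega
  · simp only [hp, decide_false, Bool.and_false]
    rw [List.all_eq_false]
    have hm2 : 2 ≤ a.toNat := by omega
    have hk := Nat.minFac_prime (by omega : a.toNat ≠ 1)
    have hkd := Nat.minFac_dvd a.toNat
    have hsq : a.toNat.minFac * a.toNat.minFac ≤ a.toNat := by
      have := Nat.minFac_sq_le_self (by omega) hp
      nlinarith
    have hlt : a.toNat.minFac < a.toNat := (Nat.not_prime_iff_minFac_lt hm2).mp hp
    have hcd : ((a.toNat.minFac : Int)) ∣ a := by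
      have : ((a.toNat.minFac : Int)) ∣ ((a.toNat : Int)) := Int.natCast_dvd_natCast.mpr hkd
      simpa [Int.toNat_of_nonneg (by omega : (0:Int) ≤ a)] using this
    refine ⟨(a.toNat.minFac : Int), ?_, ?_⟩
    · rw [List.mem_filter]
      constructor
      · rw [hmem]
        refine ⟨⟨by exact_mod_cast hk.two_le, by omega⟩, ?_⟩
        unfold primeT
        simp [hk, hk.two_le]
      · simp only [decide_eq_true_eq]
        have hc2 : ((a.toNat.minFac * a.toNat.minFac : Nat) : Int) ≤ ((a.toNat : Nat) : Int) := by
          exact_mod_cast hsq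
        push_cast at hc2
        omega
    · simp only [bne_iff_ne, ne_eq, PySem.Int.mod_eq_zero_iff_dvd, not_not]
      exact hcd

-- A's exponent loop and B's multiplication loop run in lockstep (same fuel, same tests)
theorem loops_eq (p num : Int) (fuel : Nat) : ∀ power : Nat,
    ppLoopB p num fuel (p ^ power) = p ^ powLoopA p num fuel power := by
  induction fuel with
  | zero => intro power; rfl
  | succ fuel ih =>
    intro power
    show (if p ^ power * p ≤ num then ppLoopB p num fuel (p ^ power * p) else p ^ power) = _
    rw [powLoopA, ← pow_succ]
    by_cases hle : p ^ (power + 1) ≤ num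
    · rw [if_pos hle, if_pos hle]; exact ih (power + 1)
    · rw [if_neg hle, if_neg hle]

-- B's fold body, the primes < a, and their powers (proof abbreviations)
def stepB (num : Int) (st : List Int × List Int) (n : Int) : List Int × List Int :=
  if (st.1.filter (fun p => decide (p * p ≤ n))).all (fun p => PySem.Int.mod n p != 0) then
    (st.1 ++ [n], st.2 ++ [ppLoopB n num (num + 1).toNat n])
  else st

def Pr (a : Int) : List Int := (PySem.List.pyRange 2 a 1).filter primeT

def Ou (num a : Int) : List Int := (Pr a).map (fun p => ppLoopB p num (num + 1).toNat p)

-- invariant of B's fold: the state after processing 2..a-1 is (primes < a, their largest powers)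
theorem foldB (num : Int) : ∀ (k : Nat) (a : Int), 2 ≤ a → a ≤ num + 1 → (num + 1 - a).toNat = k →
    (PySem.List.pyRange a (num + 1) 1).foldl (stepB num) (Pr a, Ou num a)
      = (Pr (num + 1), Ou num (num + 1)) := by
  intro k
  induction k with
  | zero =>
    intro a h2 hle hk
    have ha : a = num + 1 := by omega
    subst ha
    rw [PySem.List.pyRange_one_eq_nil (le_refl _), List.foldl_nil]
  | succ k ih =>
    intro a h2 hle hk
    have hlt : a < num + 1 := by omega
    rw [PySem.List.pyRange_one_cons hlt, List.foldl_cons]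
    have hmem : ∀ p : Int, p ∈ Pr a ↔ (2 ≤ p ∧ p < a) ∧ primeT p = true := by
      intro p
      simp only [Pr, List.mem_filter, PySem.List.mem_pyRange_one]
    have htest := testB_eq_primeT a h2 (Pr a) hmem
    have hstep : stepB num (Pr a, Ou num a) a = (Pr (a + 1), Ou num (a + 1)) := by
      unfold stepB
      simp only [htest]
      have hPr : Pr (a + 1) = Pr a ++ (if primeT a then [a] else []) := by
        unfold Pr
        rw [PySem.List.pyRange_one_succ_right h2, List.filter_append]
        cases hpa : primeT a <;> simp [hpa]
      cases hpa : primeT a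
      · rw [hpa] at hPr
        simp [Ou, hPr]
      · rw [hpa] at hPr
        simp [Ou, hPr]
    rw [hstep]
    exact ih (a + 1) (by omega) (by omega) (by omega)

-- ===== VERDICT (by name: the statement is the Claim_ definition above) =====
theorem primePowersCloserTo_spec : Claim_equal_primePowersCloserTo := by
  intro num _
  unfold Spec_primePowersCloserTo
  have hfun : isPrime = primeT := funext isPrime_eq_primeT
  have hA : primePowersCloserTo num
      = ((PySem.List.pyRange 0 (num + 1) 1).filter primeT).map (fun p => p ^ powLoopA p num (num + 1).toNat 1) := by
    unfold primePowersCloserTo primesUpTo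
    rw [hfun, PySem.List.foldl_append_if_eq_filter, PySem.List.foldl_append_singleton_eq_map]
    simp
  have hfilter : (PySem.List.pyRange 0 (num + 1) 1).filter primeT = Pr (num + 1) := by
    unfold Pr
    by_cases hge : 2 ≤ num + 1
    · rw [PySem.List.pyRange_one_append 0 2 (num + 1) (by norm_num) hge, List.filter_append]
      have h01 : (PySem.List.pyRange 0 2 1).filter primeT = [] := by decide
      rw [h01, List.nil_append]
    · rw [PySem.List.pyRange_one_eq_nil (by omega : num + 1 ≤ 2)]
      by_cases hle0 : num + 1 ≤ 0
      · rw [PySem.List.pyRange_one_eq_nil (by omega : num + 1 ≤ 0)]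
      · have h1 : num + 1 = 0 + 1 := by omega
        rw [h1, PySem.List.pyRange_one_singleton]
        decide
  have hB : primePowersCloserTo_alt num = Ou num (num + 1) := by
    show ((PySem.List.pyRange 2 (num + 1) 1).foldl (stepB num) ([], [])).2 = _
    by_cases hge : 2 ≤ num + 1
    · have h0 : Pr 2 = [] := by
        unfold Pr
        rw [PySem.List.pyRange_one_eq_nil (le_refl _)]
        rfl
      have h0' : Ou num 2 = [] := by rw [Ou, h0]; rfl
      have hfold := foldB num (num + 1 - 2).toNat 2 (le_refl _) hge rfl
      rw [h0, h0'] at hfold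
      rw [hfold]
    · rw [PySem.List.pyRange_one_eq_nil (by omega : num + 1 ≤ 2), List.foldl_nil]
      have h0 : Pr (num + 1) = [] := by
        unfold Pr
        rw [PySem.List.pyRange_one_eq_nil (by omega : num + 1 ≤ 2)]
        rfl
      rw [Ou, h0]
      rfl
  rw [hA, hfilter, hB]
  apply List.map_congr_left
  intro p hp
  have hpl := loops_eq p num (num + 1).toNat 1
  rw [pow_one] at hpl
  exact hpl.symm
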